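-- pv_equiv track=rewrite | github.com/alzorix/homework | MultiNewTasks/EX24COMPEGE/17878.py | ysl
-- ===== SOURCE A (Python) =====
-- def ysl(num:str):
--     if "#" in num:
--         temp = list()
--         ind = list()
--
--         maxx = list()
--         flag = True
--         last = -1
--
--         chet = -1
--         for x in num:
--             chet += 1
--             temp.append(x)
--             if x == "#":
--                 if flag:
--                     last = chet
--                     flag = False
--                 else:
--                     maxx.append(chet - last)
--
--                     last = chet
--
--                 ind.append(chet)
--
--         ind.sort()
--         if len(maxx) != 0:
--             return (False,ind[0],len(temp) - ind[-1],max(maxx)  )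
--         else:
--             return (False,ind[0],len(temp) - ind[-1],0 )#Не забываем,что под # -0,а 0*223 может быть
--     return (True,0,0,0)
-- ===== SOURCE B (Python) =====
-- def ysl(num: str):
--     pieces = num.split("#")
--     if len(pieces) == 1:
--         return (True, 0, 0, 0)
--     gaps = [len(p) + 1 for p in pieces[1:-1]]
--     return (False, len(pieces[0]), len(pieces[-1]) + 1, max(gaps) if gaps else 0)
-- ===== Notes on version B (the rewrite author's own statement) =====
-- stated objective: simpler
-- what changed: Replaces A's indexed character loop with temp/ind/maxx/flag/last bookkeeping (plus a redundant sort) by a single num.split('#'): first '#' index = len(first piece), distance past the last '#' = len(last piece)+1, max gap = max over interior pieces of len(piece)+1.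
import Mathlib
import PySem

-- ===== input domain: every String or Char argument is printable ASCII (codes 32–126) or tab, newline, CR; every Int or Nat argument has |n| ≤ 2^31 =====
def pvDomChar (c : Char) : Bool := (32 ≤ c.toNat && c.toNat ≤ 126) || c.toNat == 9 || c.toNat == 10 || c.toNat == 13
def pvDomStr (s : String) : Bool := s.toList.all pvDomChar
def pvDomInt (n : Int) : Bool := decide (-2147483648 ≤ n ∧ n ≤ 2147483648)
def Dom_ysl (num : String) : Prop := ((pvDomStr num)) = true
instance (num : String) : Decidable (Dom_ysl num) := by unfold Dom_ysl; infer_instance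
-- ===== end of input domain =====

-- B replaces A's indexed character loop (first/last/gap bookkeeping) by a single split on '#',
-- reading the answers off the piece lengths (objective: simpler).

-- ===== PORT A =====
-- loop body of A's 'for x in num' (state: temp, ind, maxx, flag, last, chet)
def yslStep (st : List Char × List Int × List Int × Bool × Int × Int) (x : Char) :
    List Char × List Int × List Int × Bool × Int × Int :=
  let (temp, ind, maxx, flag, last, chet) := st
  let chet' := chet + 1
  let temp' := temp ++ [x]
  if x = '#' then
    if flag then (temp', ind ++ [chet'], maxx, false, chet', chet')
    else (temp', ind ++ [chet'], maxx ++ [chet' - last], false, chet', chet')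
  else (temp', ind, maxx, flag, last, chet')

def ysl (num : String) : Bool × Int × Int × Int :=
  if PySem.Str.isIn "#" num then
    let st := num.toList.foldl yslStep ([], [], [], true, -1, -1)
    let temp := st.1
    let ind := PySem.List.sorted st.2.1 (fun x => x) false
    let maxx := st.2.2.1
    -- ind[0] / ind[-1] / max(maxx) are guarded in A (ind, maxx nonempty there): .getD makes them total
    if maxx.length ≠ 0 then
      (false, PySem.List.pyGetD ind 0 0, (temp.length : Int) - PySem.List.pyGetD ind (-1) 0,
        (PySem.List.max? maxx (fun x => x)).getD 0)
    else
      (false, PySem.List.pyGetD ind 0 0, (temp.length : Int) - PySem.List.pyGetD ind (-1) 0, 0)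
  else (true, 0, 0, 0)

-- ===== PORT B =====
def ysl_alt (num : String) : Bool × Int × Int × Int :=
  let pieces := (PySem.Str.split? num "#").getD []   -- sep "#" ≠ "": split? is always some
  if pieces.length = 1 then (true, 0, 0, 0)
  else
    let gapsL := (PySem.List.slice pieces (some 1) (some (-1))).map (fun p => PySem.Str.len p + 1)
    (false, PySem.Str.len (PySem.List.pyGetD pieces 0 ""),
      PySem.Str.len (PySem.List.pyGetD pieces (-1) "") + 1,
      if gapsL ≠ [] then (PySem.List.max? gapsL (fun x => x)).getD 0 else 0)

-- ===== PRECONDITION & SPEC =====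
def Spec_ysl (num : String) (out : Bool × Int × Int × Int) : Prop := out = ysl_alt num
instance (num : String) (out : Bool × Int × Int × Int) : Decidable (Spec_ysl num out) := by unfold Spec_ysl; infer_instance

-- ===== CLAIM (what is proved, stated in full; the proofs are below) =====
def Claim_equal_ysl : Prop := ∀ (num : String), Dom_ysl num → Spec_ysl num (ysl num)

-- ===== LEMMAS AND PROOFS =====

-- reference split of a char list on '#'
def splitHash : List Char → List (List Char)
  | [] => [[]]
  | c :: rest => if c = '#' then [] :: splitHash rest else (splitHash rest).modifyHead (c :: ·)

-- positions of '#' (as Ints), starting offset k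
def hpos : List Char → Int → List Int
  | [], _ => []
  | c :: r, k => if c = '#' then k :: hpos r (k + 1) else hpos r (k + 1)

-- consecutive differences
def gapsOf : List Int → List Int
  | a :: b :: t => (b - a) :: gapsOf (b :: t)
  | _ => []

-- '#' positions read off the split pieces
def posOf : Int → List (List Char) → List Int
  | _, [] => []
  | _, [_] => []
  | k, p :: q :: rest => (k + (p.length : Int)) :: posOf (k + p.length + 1) (q :: rest)

-- reconstructed total length of the split string
def totalOf (ps : List (List Char)) : Int :=
  (ps.map (fun p => (p.length : Int))).sum + ps.length - 1

theorem splitHash_ne_nil (l : List Char) : splitHash l ≠ [] := by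
  induction l with
  | nil => simp [splitHash]
  | cons c r ih =>
    simp only [splitHash]
    split
    · simp
    · cases h : splitHash r with
      | nil => exact absurd h ih
      | cons a t => simp [h]

theorem go_splitHash : ∀ (fuel : Nat) (l cur : List Char) (acc : List (List Char)),
    l.length < fuel →
    PySem.Chars.splitOn.go ['#'] fuel l cur acc
      = acc.reverse ++ (splitHash l).modifyHead (cur.reverse ++ ·) := by
  intro fuel
  induction fuel with
  | zero => intro l cur acc h; omega
  | succ f ih =>
    intro l cur acc h
    cases l with
    | nil => simp [PySem.Chars.splitOn.go, splitHash]
    | cons c rest =>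
      by_cases hc : c = '#'
      · subst hc
        have : PySem.Chars.splitOn.go ['#'] (f+1) ('#' :: rest) cur acc
            = PySem.Chars.splitOn.go ['#'] f rest [] (cur.reverse :: acc) := by
          simp [PySem.Chars.splitOn.go, List.isPrefixOf]
        rw [this, ih rest [] (cur.reverse :: acc) (by simpa using Nat.lt_of_succ_lt_succ h)]
        cases hs : splitHash rest with
        | nil => exact absurd hs (splitHash_ne_nil rest)
        | cons p ps => simp [splitHash, hs, List.modifyHead]
      · have : PySem.Chars.splitOn.go ['#'] (f+1) (c :: rest) cur acc
            = PySem.Chars.splitOn.go ['#'] f rest (c :: cur) acc := by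
          have hpre : (['#'] : List Char).isPrefixOf (c :: rest) = false := by
            simp [List.isPrefixOf]
            exact fun h => absurd h.symm hc
          simp [PySem.Chars.splitOn.go, hpre]
        rw [this, ih rest (c :: cur) acc (by simpa using Nat.lt_of_succ_lt_succ h)]
        cases hsp : splitHash rest with
        | nil => exact absurd hsp (splitHash_ne_nil rest)
        | cons p ps => simp [splitHash, hc, hsp, List.modifyHead]

theorem splitOn_eq_splitHash (l : List Char) :
    PySem.Chars.splitOn l ['#'] = splitHash l := by
  have h := go_splitHash (l.length + 1) l [] [] (by omega)
  cases hs : splitHash l with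
  | nil => exact absurd hs (splitHash_ne_nil l)
  | cons p ps =>
    rw [hs] at h
    simpa [PySem.Chars.splitOn, List.modifyHead, hs] using h

theorem splitHash_length_one_iff (l : List Char) :
    (splitHash l).length = 1 ↔ '#' ∉ l := by
  induction l with
  | nil => simp [splitHash]
  | cons c r ih =>
    by_cases hc : c = '#'
    · subst hc
      simp [splitHash]
      intro h
      have := splitHash_ne_nil r
      cases hs : splitHash r with
      | nil => exact this hs
      | cons a t => simp [hs] at h
    · simp [splitHash, hc, List.length_modifyHead, ih, Ne.symm hc]

theorem hpos_eq_posOf (l : List Char) : ∀ k, hpos l k = posOf k (splitHash l) := by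
  induction l with
  | nil => intro k; simp [hpos, splitHash, posOf]
  | cons c r ih =>
    intro k
    by_cases hc : c = '#'
    · subst hc
      cases hs : splitHash r with
      | nil => exact absurd hs (splitHash_ne_nil r)
      | cons p ps =>
        simp only [hpos, splitHash, if_pos rfl, hs, posOf]
        cases ps with
        | nil =>
          have : hpos r (k+1) = [] := by rw [ih (k+1), hs]; rfl
          simp [posOf, this]
        | cons q qs =>
          have : hpos r (k+1) = posOf (k+1) (p :: q :: qs) := by rw [ih (k+1), hs]
          simp [posOf, this]
    · cases hs : splitHash r with
      | nil => exact absurd hs (splitHash_ne_nil r)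
      | cons p ps =>
        simp only [hpos, if_neg hc, splitHash, hs, List.modifyHead]
        cases ps with
        | nil =>
          have : hpos r (k+1) = [] := by rw [ih (k+1), hs]; rfl
          simp [posOf, this]
        | cons q qs =>
          have h1 : hpos r (k+1) = posOf (k+1) (p :: q :: qs) := by rw [ih (k+1), hs]
          simp only [posOf] at h1 ⊢
          rw [h1]
          simp only [List.length_cons]
          push_cast
          ring_nf

theorem le_of_mem_posOf : ∀ (ps : List (List Char)) (k m : Int), m ∈ posOf k ps → k ≤ m := by
  intro ps
  induction ps with
  | nil => intro k m h; simp [posOf] at h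
  | cons p rest ih =>
    intro k m h
    cases rest with
    | nil => simp [posOf] at h
    | cons q qs =>
      simp only [posOf, List.mem_cons] at h
      rcases h with h | h
      · omega
      · have := ih (k + p.length + 1) m h
        have : (0:Int) ≤ p.length := by positivity
        omega

theorem posOf_pairwise : ∀ (ps : List (List Char)) (k : Int),
    (posOf k ps).Pairwise (· ≤ ·) := by
  intro ps
  induction ps with
  | nil => intro k; simp [posOf]
  | cons p rest ih =>
    intro k
    cases rest with
    | nil => simp [posOf]
    | cons q qs =>
      simp only [posOf]
      refine List.pairwise_cons.mpr ⟨?_, ih (k + p.length + 1)⟩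
      intro m hm
      have := le_of_mem_posOf (q :: qs) (k + p.length + 1) m hm
      have h0 : (0:Int) ≤ p.length := by positivity
      omega

theorem posOf_getLastD : ∀ (ps : List (List Char)) (k d : Int), 2 ≤ ps.length →
    (posOf k ps).getLastD d = k + totalOf ps - (ps.getLastD []).length - 1 := by
  intro ps
  induction ps with
  | nil => intro k d h; simp at h
  | cons p rest ih =>
    intro k d h
    cases rest with
    | nil => simp at h
    | cons q qs =>
      cases qs with
      | nil => simp [posOf, totalOf]; ring
      | cons r rs =>
        have IH := ih (k + (p.length : Int) + 1) d (by simp)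
        simp only [posOf, List.getLastD_cons] at IH ⊢
        rw [IH]
        simp [totalOf, List.getLastD_cons]
        push_cast
        ring

theorem gapsOf_posOf : ∀ (ps : List (List Char)) (k : Int),
    gapsOf (posOf k ps) = ((ps.drop 1).dropLast).map (fun q => (q.length : Int) + 1) := by
  intro ps
  induction ps with
  | nil => intro k; simp [posOf, gapsOf]
  | cons p rest ih =>
    intro k
    cases rest with
    | nil => simp [posOf, gapsOf]
    | cons q qs =>
      cases qs with
      | nil => simp [posOf, gapsOf]
      | cons r rs =>
        have IH := ih (k + (p.length : Int) + 1)
        simp only [posOf] at IH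
        simp only [posOf, gapsOf, IH]
        simp only [List.drop_one, List.tail_cons, List.dropLast_cons₂, List.map_cons]
        congr 1
        push_cast
        ring

theorem totalOf_splitHash (l : List Char) : totalOf (splitHash l) = l.length := by
  induction l with
  | nil => simp [splitHash, totalOf]
  | cons c r ih =>
    by_cases hc : c = '#'
    · subst hc
      simp only [splitHash, if_pos rfl]
      simp [totalOf] at ih ⊢
      push_cast at ih ⊢
      omega
    · cases hs : splitHash r with
      | nil => exact absurd hs (splitHash_ne_nil r)
      | cons p ps =>
        simp only [splitHash, if_neg hc, hs, List.modifyHead]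
        rw [hs] at ih
        simp [totalOf] at ih ⊢
        push_cast at ih ⊢
        omega

theorem foldl_yslStep : ∀ (l : List Char) (temp : List Char) (ind maxx : List Int)
    (flag : Bool) (last chet : Int),
    l.foldl yslStep (temp, ind, maxx, flag, last, chet)
      = (temp ++ l,
         ind ++ hpos l (chet + 1),
         maxx ++ gapsOf ((if flag then [] else [last]) ++ hpos l (chet + 1)),
         flag && (hpos l (chet + 1)).isEmpty,
         (hpos l (chet + 1)).getLastD last,
         chet + l.length) := by
  intro l
  induction l with
  | nil => intro temp ind maxx flag last chet; cases flag <;> simp [hpos, gapsOf]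
  | cons c r ih =>
    intro temp ind maxx flag last chet
    by_cases hc : c = '#'
    · subst hc
      cases flag with
      | true =>
        simp only [List.foldl_cons, yslStep, if_pos rfl]
        rw [ih]
        simp [hpos, List.getLastD_cons, gapsOf]
        refine ⟨?_, by ring⟩
        cases hpos r (chet + 1 + 1) <;> simp [List.getLast?_cons]
      | false =>
        simp only [List.foldl_cons, yslStep, if_pos rfl]
        rw [ih]
        simp [hpos, List.getLastD_cons, gapsOf]
        refine ⟨?_, by ring⟩
        cases hpos r (chet + 1 + 1) <;> simp [List.getLast?_cons]
    · simp only [List.foldl_cons, yslStep, if_neg hc]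
      rw [ih]
      simp [hpos, hc]
      ring

theorem mem_iff_infix_singleton (l : List Char) : ['#'] <:+: l ↔ '#' ∈ l := by
  constructor
  · intro h; exact h.subset (by simp)
  · intro h
    obtain ⟨s, t, rfl⟩ := List.append_of_mem h
    exact ⟨s, t, by simp⟩

theorem slice_one_neg_one {α : Type} (xs : List α) :
    PySem.List.slice xs (some 1) (some (-1)) = (xs.drop 1).dropLast := by
  cases xs with
  | nil => rfl
  | cons x t =>
    simp [PySem.List.slice, PySem.List.clampIdx, List.dropLast_eq_take]
    split <;> omega

theorem pieces_eq (num : String) :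
    (PySem.Str.split? num "#").getD [] = (splitHash num.toList).map String.ofList := by
  have : ("#" : String).toList = ['#'] := rfl
  simp [PySem.Str.split?, PySem.Chars.split?, this, splitOn_eq_splitHash, List.isEmpty]

-- ===== VERDICT (by name: the statement is the Claim_ definition above) =====
theorem ysl_spec : Claim_equal_ysl := by
  intro num _
  unfold Spec_ysl
  unfold ysl ysl_alt
  rw [pieces_eq num]
  by_cases h : '#' ∈ num.toList
  · -- both take the '#'-present branch
    have hA : PySem.Str.isIn "#" num = true := by
      rw [PySem.Str.isIn_iff_infix]
      exact (mem_iff_infix_singleton _).mpr h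
    obtain ⟨p₀, q, rest, hs⟩ : ∃ p₀ q rest, splitHash num.toList = p₀ :: q :: rest := by
      have h1 := splitHash_ne_nil num.toList
      have h2 := (splitHash_length_one_iff num.toList).not.mpr (by simpa using h)
      cases hsp : splitHash num.toList with
      | nil => exact absurd hsp h1
      | cons a t =>
        cases t with
        | nil => rw [hsp] at h2; simp at h2
        | cons b u => exact ⟨a, b, u, rfl⟩
    have hfold := foldl_yslStep num.toList [] [] [] true (-1) (-1)
    have hP : hpos num.toList (-1 + 1) = posOf 0 (p₀ :: q :: rest) := by
      rw [show (-1 + 1 : Int) = 0 by ring, hpos_eq_posOf, hs]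
    have hlen2 : 2 ≤ (p₀ :: q :: rest).length := by simp
    have hsorted : PySem.List.sorted (posOf 0 (p₀ :: q :: rest)) (fun x => x) false
        = posOf 0 (p₀ :: q :: rest) :=
      PySem.List.sorted_eq_self_of_pairwise _ _ (by simpa using posOf_pairwise (p₀ :: q :: rest) 0)
    rw [hA, hs]
    simp only [hfold, hP, List.nil_append, if_true, cond_true]
    rw [hsorted]
    -- the four components
    have hcons : posOf 0 (p₀ :: q :: rest)
        = ((p₀.length : Int)) :: posOf ((p₀.length : Int) + 1) (q :: rest) := by
      simp [posOf]
    have hfirst : PySem.List.pyGetD (posOf 0 (p₀ :: q :: rest)) 0 0 = (p₀.length : Int) := by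
      rw [hcons, PySem.List.pyGetD_ofNat']
      rfl
    have hne : posOf 0 (p₀ :: q :: rest) ≠ [] := by rw [hcons]; simp
    have hlast : PySem.List.pyGetD (posOf 0 (p₀ :: q :: rest)) (-1) 0
        = (num.toList.length : Int) - ((p₀ :: q :: rest).getLastD []).length - 1 := by
      have hlen1 : 1 ≤ (posOf 0 (p₀ :: q :: rest)).length := by
        cases hc : posOf 0 (p₀ :: q :: rest) with
        | nil => exact absurd hc hne
        | cons a t => simp
      unfold PySem.List.pyGetD
      rw [PySem.List.pyGet?_neg_ofNat _ 1 (by omega) hlen1]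
      rw [← List.getLast?_eq_getElem?, ← List.getLastD_eq_getLast?]
      rw [posOf_getLastD _ 0 0 hlen2, ← hs, totalOf_splitHash]
      ring
    have hgaps : gapsOf (posOf 0 (p₀ :: q :: rest))
        = (((p₀ :: q :: rest).drop 1).dropLast).map (fun p => (p.length : Int) + 1) :=
      gapsOf_posOf _ 0
    -- B-side pieces
    have hBlen : (List.map String.ofList (p₀ :: q :: rest)).length = 1 ↔ False := by simp
    have hB0 : PySem.List.pyGetD (List.map String.ofList (p₀ :: q :: rest)) 0 ""
        = String.ofList p₀ := by
      rw [PySem.List.pyGetD_ofNat']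
      rfl
    have hBlast : PySem.List.pyGetD (List.map String.ofList (p₀ :: q :: rest)) (-1) ""
        = String.ofList ((p₀ :: q :: rest).getLastD []) := by
      unfold PySem.List.pyGetD
      rw [PySem.List.pyGet?_neg_ofNat _ 1 (by omega) (by simp)]
      rw [← List.getLast?_eq_getElem?, List.getLast?_map]
      cases hg : (p₀ :: q :: rest).getLast? with
      | none => simp at hg
      | some v => simp [hg, List.getLastD_eq_getLast?]
    have hBslice : PySem.List.slice (List.map String.ofList (p₀ :: q :: rest)) (some 1) (some (-1))
        = List.map String.ofList (((p₀ :: q :: rest).drop 1).dropLast) := by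
      rw [slice_one_neg_one]
      simp [List.map_dropLast]
    have hBgaps : (PySem.List.slice (List.map String.ofList (p₀ :: q :: rest)) (some 1) (some (-1))).map
          (fun p => PySem.Str.len p + 1)
        = (((p₀ :: q :: rest).drop 1).dropLast).map (fun p => (p.length : Int) + 1) := by
      rw [hBslice, List.map_map]
      refine List.map_congr_left ?_
      intro a _
      simp [PySem.Str.len]
    simp only [hBlen, if_false, hfirst, hlast, hgaps, hB0, hBlast, hBgaps]
    simp [PySem.Str.len]
    have hdl : (((q.length : Int) + 1) :: List.map (fun p => (p.length : Int) + 1) rest).dropLast = []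
        ↔ rest = [] := by
      cases rest <;> simp
    split_ifs with h1 h2 h2
    · simp only [Prod.mk.injEq]
      refine ⟨?_, ?_, ?_, ?_⟩ <;> first | trivial | ring
    · exact absurd (hdl.mpr h1) h2
    · exact absurd (hdl.mp h2) h1
    · simp only [Prod.mk.injEq]
      refine ⟨?_, ?_, ?_, ?_⟩ <;> first | trivial | ring
  · -- no '#': both trivial branches
    have hA : PySem.Str.isIn "#" num = false := by
      rw [← Bool.not_eq_true, PySem.Str.isIn_iff_infix]
      exact fun hin => h ((mem_iff_infix_singleton _).mp hin)
    have hB : ((splitHash num.toList).map String.ofList).length = 1 :=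
      by simpa using (splitHash_length_one_iff num.toList).mpr h
    rw [hA]
    simp [hB]
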